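-- pv_equiv track=rewrite | github.com/zalio/word-problem-solver-thesis | number_assigners/type11_num_assigner.py | assign_n2
-- ===== SOURCE A (Python) =====
-- def assign_n2(prioritized_numbers, original_question):
--     n2 = ""
--     original_split = original_question.replace('. ', ' ').replace('?', '').replace(',', '').split()
--     for i in range(len(original_split)):
--         if (original_split[i] == "twice" or original_split[i] == "thrice") and original_split[i] in prioritized_numbers:
--             n2 = original_split[i]
--         elif (original_split[i] == "times" or
--               original_split[i] == "of") and original_split[i - 1] in prioritized_numbers:
--             n2 = original_split[i - 1]
--     return n2
-- ===== SOURCE B (Python) =====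
-- def assign_n2(prioritized_numbers, original_question):
--     tokens = original_question.replace('. ', ' ').replace('?', '').replace(',', '').split()
--     for i in range(len(tokens) - 1, -1, -1):
--         t = tokens[i]
--         if t in ("twice", "thrice") and t in prioritized_numbers:
--             return t
--         if (t == "times" or t == "of") and tokens[i - 1] in prioritized_numbers:
--             return tokens[i - 1]
--     return ""
-- ===== Notes on version B (the rewrite author's own statement) =====
-- stated objective: alternative
-- what changed: The forward full-pass last-wins accumulator loop is replaced by a reverse scan that returns the first (i.e. last-in-order) match immediately and skips the rest of the tokens.
import Mathlib
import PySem

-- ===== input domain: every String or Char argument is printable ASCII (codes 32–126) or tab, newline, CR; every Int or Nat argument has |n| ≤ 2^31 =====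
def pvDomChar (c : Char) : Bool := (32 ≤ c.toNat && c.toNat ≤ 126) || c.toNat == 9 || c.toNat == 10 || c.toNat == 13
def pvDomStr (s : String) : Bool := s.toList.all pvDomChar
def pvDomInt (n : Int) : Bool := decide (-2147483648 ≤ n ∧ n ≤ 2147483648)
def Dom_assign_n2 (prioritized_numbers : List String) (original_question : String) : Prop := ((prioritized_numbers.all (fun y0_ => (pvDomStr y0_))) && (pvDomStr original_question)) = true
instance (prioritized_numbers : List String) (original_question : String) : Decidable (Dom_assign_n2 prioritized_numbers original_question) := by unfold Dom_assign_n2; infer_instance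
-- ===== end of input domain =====

-- B replaces A's forward last-wins accumulator loop with a reverse scan that returns at the first match (objective: alternative decomposition, same cost).

-- shared token preprocessing (identical line of Python in A and B)
def pvTokens (q : String) : List String :=
  PySem.Str.split₀ (PySem.Str.replace (PySem.Str.replace (PySem.Str.replace q ". " " ") "?" "") "," "")

-- ===== PORT A =====
def assign_n2 (prioritized_numbers : List String) (original_question : String) : String :=
  let original_split := pvTokens original_question
  (List.range original_split.length).foldl (fun (n2 : String) (i : Nat) =>
    let t := PySem.List.pyGetD original_split (i : Int) ""
    if (t = "twice" ∨ t = "thrice") ∧ t ∈ prioritized_numbers then t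
    else
      let u := PySem.List.pyGetD original_split ((i : Int) - 1) ""
      if (t = "times" ∨ t = "of") ∧ u ∈ prioritized_numbers then u
      else n2) ""

-- ===== PORT B =====
-- reverse scan from index i-1 down to 0, early return on the first match
def pvAltScan (prioritized_numbers tokens : List String) : Nat → String
  | 0 => ""
  | i + 1 =>
    let t := PySem.List.pyGetD tokens (i : Int) ""
    if (t = "twice" ∨ t = "thrice") ∧ t ∈ prioritized_numbers then t
    else
      let u := PySem.List.pyGetD tokens ((i : Int) - 1) ""
      if (t = "times" ∨ t = "of") ∧ u ∈ prioritized_numbers then u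
      else pvAltScan prioritized_numbers tokens i

def assign_n2_alt (prioritized_numbers : List String) (original_question : String) : String :=
  let tokens := pvTokens original_question
  pvAltScan prioritized_numbers tokens tokens.length

-- ===== PRECONDITION & SPEC =====
def Spec_assign_n2 (prioritized_numbers : List String) (original_question : String) (out : String) : Prop := out = assign_n2_alt prioritized_numbers original_question
instance (prioritized_numbers : List String) (original_question : String) (out : String) : Decidable (Spec_assign_n2 prioritized_numbers original_question out) := by unfold Spec_assign_n2; infer_instance

-- ===== CLAIM (what is proved, stated in full; the proofs are below) =====
def Claim_equal_assign_n2 : Prop := ∀ (prioritized_numbers : List String) (original_question : String), Dom_assign_n2 prioritized_numbers original_question → Spec_assign_n2 prioritized_numbers original_question (assign_n2 prioritized_numbers original_question)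

-- ===== LEMMAS AND PROOFS =====
-- A's forward last-wins fold over range m equals B's reverse first-match scan from m
theorem pvLoop_eq (pn toks : List String) (m : Nat) :
    (List.range m).foldl (fun (n2 : String) (i : Nat) =>
      let t := PySem.List.pyGetD toks (i : Int) ""
      if (t = "twice" ∨ t = "thrice") ∧ t ∈ pn then t
      else
        let u := PySem.List.pyGetD toks ((i : Int) - 1) ""
        if (t = "times" ∨ t = "of") ∧ u ∈ pn then u
        else n2) "" = pvAltScan pn toks m := by
  induction m with
  | zero => rfl
  | succ k ih =>
    rw [List.range_succ, List.foldl_append, ih]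
    rfl

-- ===== VERDICT (by name: the statement is the Claim_ definition above) =====
theorem assign_n2_spec : Claim_equal_assign_n2 := by
  intro pn q _
  unfold Spec_assign_n2 assign_n2 assign_n2_alt
  exact pvLoop_eq pn (pvTokens q) (pvTokens q).length
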